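-- pv_equiv track=rewrite | github.com/Leewongi0731/DailyCodeTest | [프로그래머스 레벨4] 지형 편집.py | solution
-- ===== SOURCE A (Python) =====
-- from collections import Counter
--
-- def solution(land, P, Q):
--     N = len(land)
--
--     allLand = []
--     for l in land:  allLand += l
--     counter = Counter( allLand )
--     layers = sorted( list( counter.keys() ) )
--
--     layer = layers[0]
--     # up / down
--     areaCount = [0, N*N-counter[layer]]
--     blockCount = [ 0, 0 ]
--     for c in counter:
--         blockCount[1] += counter[c] * ( c-layer )
--
--     answer = blockCount[0]*P + blockCount[1]*Q
--     for nextLayer in layers[1:]: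
--         # 한층 올라가면, 올라가는 area 갯수가 증가하고, 그 만큼 쌓아야하는 block수가 증가함
--         areaCount[0] += counter[layer]
--         blockCount[0] += areaCount[0] * ( nextLayer - layer )
--
--         # 한층 올라가면, 내려야하는 block수가 감소하고, 현재 층 갯수만큼 내려가는 area 갯수가 감소함
--         blockCount[1] -= areaCount[1] * ( nextLayer - layer )
--         areaCount[1] -= counter[nextLayer]
--
--         answer = min( answer, blockCount[0]*P + blockCount[1]*Q )
--         layer = nextLayer
--     return answer
-- ===== SOURCE B (Python) =====
-- from collections import Counter
--
-- def solution(land, P, Q):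
--     N = len(land)
--     cnt = Counter(v for row in land for v in row)
--     base = min(cnt)
--     above = sum(c * (v - base) for v, c in cnt.items())  # blocks sitting above the base level
--     best = None
--     for h in cnt:
--         add = sum(c * (h - v) for v, c in cnt.items() if v < h)
--         # volume conservation on the N*N board: raising everything from base to h
--         # takes N*N*(h-base) blocks in total; 'add' of them are new, the rest must
--         # already stick out above h
--         remove = above + add - N * N * (h - base)
--         cost = add * P + remove * Q
--         if best is None or cost < best:
--             best = cost
--     return best
-- ===== Notes on version B (the rewrite author's own statement) =====
-- stated objective: alternative
-- what changed: B replaces A's sorted incremental sweep (running area/block accumulators updated layer by layer) with a per-candidate closed form: for each distinct height h it sums the blocks to add below h from the height Counter and obtains the blocks to remove by volume conservation on the N*N board (blocks above the base level + blocks added - N*N*(h-base)), taking the min over the candidates.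
import Mathlib
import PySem

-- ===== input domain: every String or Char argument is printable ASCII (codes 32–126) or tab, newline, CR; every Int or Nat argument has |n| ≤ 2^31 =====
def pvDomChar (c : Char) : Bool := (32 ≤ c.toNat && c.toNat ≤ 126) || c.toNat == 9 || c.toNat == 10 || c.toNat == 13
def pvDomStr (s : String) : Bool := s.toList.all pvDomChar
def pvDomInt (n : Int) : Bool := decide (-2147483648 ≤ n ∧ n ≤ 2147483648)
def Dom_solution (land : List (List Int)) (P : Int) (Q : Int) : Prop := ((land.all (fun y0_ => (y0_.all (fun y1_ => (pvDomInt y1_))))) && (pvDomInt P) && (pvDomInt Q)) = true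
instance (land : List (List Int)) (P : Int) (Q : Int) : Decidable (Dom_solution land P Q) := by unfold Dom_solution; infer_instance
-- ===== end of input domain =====

-- B replaces A's incremental accumulator sweep with a per-candidate volume-conservation closed form;
-- equivalence is about the return value on every board with at least one cell.

-- ===== PORT A =====
def solution (land : List (List Int)) (P : Int) (Q : Int) : Int :=
  let N : Int := land.length
  let allLand : List Int := land.foldl (fun acc l => acc ++ l) []
  let counter := PySem.Dict.counter allLand
  let layers := PySem.List.sorted counter.keys (fun x => x) false
  match layers with
  | [] => 0   -- Python raises IndexError on layers[0]; excluded by Pre_solution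
  | layer :: rest =>
    let areaCount : Int × Int := (0, N * N - counter.getD layer 0)
    let blockCount : Int × Int :=
      (0, counter.keys.foldl (fun s c => s + counter.getD c 0 * (c - layer)) 0)
    let answer := blockCount.1 * P + blockCount.2 * Q
    let st := rest.foldl
      (fun (s : Int × Int × Int × Int × Int × Int) nextLayer =>
        let (a0, a1, b0, b1, ans, layer) := s
        let a0 := a0 + counter.getD layer 0
        let b0 := b0 + a0 * (nextLayer - layer)
        let b1 := b1 - a1 * (nextLayer - layer)
        let a1 := a1 - counter.getD nextLayer 0
        let ans := min ans (b0 * P + b1 * Q)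
        (a0, a1, b0, b1, ans, nextLayer))
      (areaCount.1, areaCount.2, blockCount.1, blockCount.2, answer, layer)
    st.2.2.2.2.1

-- ===== PORT B =====
def solution_alt (land : List (List Int)) (P : Int) (Q : Int) : Int :=
  let N : Int := land.length
  let cnt := PySem.Dict.counter (land.flatMap (fun row => row))
  let base := (PySem.List.min? cnt.keys (fun x => x)).getD 0   -- min(cnt); Python raises ValueError on an empty board, excluded by Pre_solution
  let above := cnt.items.foldl (fun s p => s + p.2 * (p.1 - base)) 0
  let best := cnt.keys.foldl
    (fun (best : Option Int) h =>
      let add := cnt.items.foldl (fun s p => s + (if p.1 < h then p.2 * (h - p.1) else 0)) 0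
      let remove := above + add - N * N * (h - base)
      let cost := add * P + remove * Q
      match best with
      | none => some cost
      | some b => some (if cost < b then cost else b))
    none
  best.getD 0

-- ===== PRECONDITION & SPEC =====
-- A indexes layers[0]: it raises IndexError exactly when land has no cells; Pre_ excludes only that.
def Pre_solution (land : List (List Int)) (P : Int) (Q : Int) : Prop := land.flatten ≠ []
instance (land : List (List Int)) (P : Int) (Q : Int) : Decidable (Pre_solution land P Q) := by unfold Pre_solution; infer_instance
def pvWitness_solution : List (List Int) × Int × Int := ([[1, 2], [3, 1]], 2, 3)

def Spec_solution (land : List (List Int)) (P : Int) (Q : Int) (out : Int) : Prop := out = solution_alt land P Q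
instance (land : List (List Int)) (P : Int) (Q : Int) (out : Int) : Decidable (Spec_solution land P Q out) := by unfold Spec_solution; infer_instance

-- ===== CLAIM (what is proved, stated in full; the proofs are below) =====
def Claim_equal_solution : Prop := ∀ (land : List (List Int)) (P : Int) (Q : Int), Dom_solution land P Q → Pre_solution land P Q → Spec_solution land P Q (solution land P Q)

-- ===== LEMMAS AND PROOFS =====

def pvSumC (l : List (Int × Int)) : Int := (l.map (·.2)).sum
def pvUp (h : Int) (l : List (Int × Int)) : Int := (l.map (fun p => p.2 * (h - p.1))).sum
def pvDn (h : Int) (l : List (Int × Int)) : Int := (l.map (fun p => p.2 * (p.1 - h))).sum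
def pvCostB (P Q NN T base : Int) (ps : List (Int × Int)) (h : Int) : Int :=
  ((ps.filter (fun p => decide (p.1 < h))).map (fun p => p.2 * (h - p.1))).sum * P +
  (((ps.filter (fun p => decide (p.1 > h))).map (fun p => p.2 * (p.1 - h))).sum - (NN - T) * (h - base)) * Q

theorem pvUp_shift (l : List (Int × Int)) (h h' : Int) :
    pvUp h' l = pvUp h l + pvSumC l * (h' - h) := by
  induction l with
  | nil => simp [pvUp, pvSumC]
  | cons p t ih =>
    simp only [pvUp, pvSumC, List.map_cons, List.sum_cons] at ih ⊢
    rw [ih]; ring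

theorem pvDn_shift (l : List (Int × Int)) (h h' : Int) :
    pvDn h' l = pvDn h l - pvSumC l * (h' - h) := by
  induction l with
  | nil => simp [pvDn, pvSumC]
  | cons p t ih =>
    simp only [pvDn, pvSumC, List.map_cons, List.sum_cons] at ih ⊢
    rw [ih]; ring

theorem pvFilter_lt (pre suf : List (Int × Int)) (cur : Int × Int)
    (hchain : (pre ++ cur :: suf).Pairwise (fun a b => a.1 < b.1)) :
    (pre ++ cur :: suf).filter (fun p => decide (p.1 < cur.1)) = pre := by
  rw [List.pairwise_append] at hchain
  obtain ⟨h1, h2, h3⟩ := hchain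
  rw [List.filter_append]
  have e1 : pre.filter (fun p => decide (p.1 < cur.1)) = pre :=
    List.filter_eq_self.mpr (fun p hp => decide_eq_true (h3 p hp cur (List.mem_cons_self)))
  have e2 : (cur :: suf).filter (fun p => decide (p.1 < cur.1)) = [] := by
    rw [List.pairwise_cons] at h2
    refine List.filter_eq_nil_iff.mpr ?_
    intro p hp
    rcases List.mem_cons.mp hp with rfl | hp'
    · simp
    · simp only [decide_eq_true_eq]; exact not_lt.mpr (le_of_lt (h2.1 p hp'))
  rw [e1, e2, List.append_nil]

theorem pvFilter_gt (pre suf : List (Int × Int)) (cur : Int × Int)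
    (hchain : (pre ++ cur :: suf).Pairwise (fun a b => a.1 < b.1)) :
    (pre ++ cur :: suf).filter (fun p => decide (p.1 > cur.1)) = suf := by
  rw [List.pairwise_append] at hchain
  obtain ⟨h1, h2, h3⟩ := hchain
  rw [List.filter_append]
  have e1 : pre.filter (fun p => decide (p.1 > cur.1)) = [] :=
    List.filter_eq_nil_iff.mpr (fun p hp => by
      simp only [decide_eq_true_eq]
      exact not_lt.mpr (le_of_lt (h3 p hp cur (List.mem_cons_self))))
  have e2 : (cur :: suf).filter (fun p => decide (p.1 > cur.1)) = suf := by
    rw [List.pairwise_cons] at h2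
    rw [List.filter_cons]
    simp only [gt_iff_lt, lt_self_iff_false, decide_false]
    simp only [if_neg (by simp : ¬(false = true))]
    exact List.filter_eq_self.mpr (fun p hp => decide_eq_true (h2.1 p hp))
  rw [e1, e2, List.nil_append]

theorem pvCostB_split (P Q NN T base : Int) (pre suf : List (Int × Int)) (cur : Int × Int)
    (hchain : (pre ++ cur :: suf).Pairwise (fun a b => a.1 < b.1)) :
    pvCostB P Q NN T base (pre ++ cur :: suf) cur.1 =
      pvUp cur.1 pre * P + (pvDn cur.1 suf - (NN - T) * (cur.1 - base)) * Q := by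
  unfold pvCostB
  rw [pvFilter_lt pre suf cur hchain, pvFilter_gt pre suf cur hchain]
  rfl

theorem pvSumC_append (l l' : List (Int × Int)) : pvSumC (l ++ l') = pvSumC l + pvSumC l' := by
  simp [pvSumC]

theorem pvUp_append (h : Int) (l l' : List (Int × Int)) : pvUp h (l ++ l') = pvUp h l + pvUp h l' := by
  simp [pvUp]

theorem pvMin_eq (a c : Int) : min a c = if c < a then c else a := by
  rw [min_def]; split_ifs <;> omega

theorem pvLoop (f : Int → Int) (P Q NN T base : Int) (ps : List (Int × Int))
    (hchain : ps.Pairwise (fun a b => a.1 < b.1))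
    (hf : ∀ p ∈ ps, f p.1 = p.2)
    (hT : T = pvSumC ps) :
    ∀ (suf pre : List (Int × Int)) (cur : Int × Int) (ans : Int),
    ps = pre ++ cur :: suf →
    ((suf.map (·.1)).foldl
      (fun (s : Int × Int × Int × Int × Int × Int) nextLayer =>
        let (a0, a1, b0, b1, ans, layer) := s
        let a0 := a0 + f layer
        let b0 := b0 + a0 * (nextLayer - layer)
        let b1 := b1 - a1 * (nextLayer - layer)
        let a1 := a1 - f nextLayer
        let ans := min ans (b0 * P + b1 * Q)
        (a0, a1, b0, b1, ans, nextLayer))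
      (pvSumC pre, NN - pvSumC pre - cur.2, pvUp cur.1 pre,
       pvDn cur.1 suf - (NN - T) * (cur.1 - base), ans, cur.1)).2.2.2.2.1
    = suf.foldl (fun m p =>
        if pvCostB P Q NN T base ps p.1 < m then pvCostB P Q NN T base ps p.1 else m) ans := by
  intro suf
  induction suf with
  | nil => intro pre cur ans _; rfl
  | cons nxt suf' ih =>
    intro pre cur ans hsplit
    have hcur : f cur.1 = cur.2 := hf cur (by rw [hsplit]; exact List.mem_append_right _ (List.mem_cons_self))
    have hnxt : f nxt.1 = nxt.2 := hf nxt (by rw [hsplit]; exact List.mem_append_right _ (List.mem_cons_of_mem _ (List.mem_cons_self)))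
    have hsplit' : ps = (pre ++ [cur]) ++ nxt :: suf' := by rw [hsplit]; simp
    have hT' : T = pvSumC pre + cur.2 + (nxt.2 + pvSumC suf') := by
      rw [hT, hsplit, pvSumC_append]; simp [pvSumC]; ring
    have hchain' : ((pre ++ [cur]) ++ nxt :: suf').Pairwise (fun a b => a.1 < b.1) := by
      rw [← hsplit']; exact hchain
    have hb0 : pvUp cur.1 pre + (pvSumC pre + cur.2) * (nxt.1 - cur.1) = pvUp nxt.1 (pre ++ [cur]) := by
      rw [pvUp_append, pvUp_shift pre cur.1 nxt.1]
      simp [pvUp]; ring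
    have hb1 : pvDn cur.1 (nxt :: suf') - (NN - T) * (cur.1 - base)
        - (NN - pvSumC pre - cur.2) * (nxt.1 - cur.1)
        = pvDn nxt.1 suf' - (NN - T) * (nxt.1 - base) := by
      have hsh : pvDn cur.1 suf' = pvDn nxt.1 suf' - pvSumC suf' * (cur.1 - nxt.1) :=
        pvDn_shift suf' nxt.1 cur.1
      simp only [pvDn, pvSumC, List.map_cons, List.sum_cons]
      simp only [pvDn, pvSumC] at hsh
      rw [hsh]
      simp only [pvSumC] at hT'
      linear_combination (cur.1 - nxt.1) * hT'
    have hcost : pvUp nxt.1 (pre ++ [cur]) * P + (pvDn nxt.1 suf' - (NN - T) * (nxt.1 - base)) * Q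
        = pvCostB P Q NN T base ps nxt.1 := by
      rw [hsplit', pvCostB_split P Q NN T base (pre ++ [cur]) suf' nxt hchain']
    have ha0 : pvSumC pre + cur.2 = pvSumC (pre ++ [cur]) := by simp [pvSumC]
    have ha1 : NN - pvSumC pre - cur.2 - nxt.2 = NN - pvSumC (pre ++ [cur]) - nxt.2 := by
      rw [← ha0]; ring
    simp only [List.map_cons, List.foldl_cons]
    rw [hcur, hnxt, hb0, hb1, hcost, pvMin_eq, ha1, ha0]
    exact ih (pre ++ [cur]) nxt _ hsplit'

-- B's add-loop computes the raise sum over the heights below h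
theorem pvAddFold (h : Int) : ∀ (l : List (Int × Int)) (a : Int),
    l.foldl (fun s p => s + (if p.1 < h then p.2 * (h - p.1) else 0)) a
    = a + ((l.filter (fun p => decide (p.1 < h))).map (fun p => p.2 * (h - p.1))).sum := by
  intro l
  induction l with
  | nil => intro a; simp
  | cons p t ih =>
    intro a
    by_cases h1 : p.1 < h
    · have e : List.filter (fun p => decide (p.1 < h)) (p :: t) = p :: List.filter (fun p => decide (p.1 < h)) t := by
        simp [h1]
      simp only [List.foldl_cons, if_pos h1]
      rw [ih, e, List.map_cons, List.sum_cons]; ring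
    · have e : List.filter (fun p => decide (p.1 < h)) (p :: t) = List.filter (fun p => decide (p.1 < h)) t := by
        simp [h1]
      simp only [List.foldl_cons, if_neg h1]
      rw [ih, e]; ring

-- B's above-loop computes pvDn at the base level
theorem pvDnFold (b : Int) : ∀ (l : List (Int × Int)) (a : Int),
    l.foldl (fun s p => s + p.2 * (p.1 - b)) a = a + pvDn b l := by
  intro l
  induction l with
  | nil => intro a; simp [pvDn]
  | cons p t ih =>
    intro a
    simp only [List.foldl_cons, pvDn, List.map_cons, List.sum_cons] at ih ⊢
    rw [ih]; ring

-- the signed drop splits into the lower-minus-upper filtered sums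
theorem pvSplitDn (h : Int) : ∀ l : List (Int × Int),
    pvDn h l = ((l.filter (fun p => decide (p.1 > h))).map (fun p => p.2 * (p.1 - h))).sum
             - ((l.filter (fun p => decide (p.1 < h))).map (fun p => p.2 * (h - p.1))).sum := by
  intro l
  induction l with
  | nil => simp [pvDn]
  | cons p t ih =>
    rcases lt_trichotomy p.1 h with h1 | h1 | h1
    · have e1 : List.filter (fun p => decide (p.1 < h)) (p :: t) = p :: List.filter (fun p => decide (p.1 < h)) t := by
        simp [h1]
      have e2 : List.filter (fun p => decide (p.1 > h)) (p :: t) = List.filter (fun p => decide (p.1 > h)) t := by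
        simp [List.filter_cons]; omega
      simp only [pvDn, List.map_cons, List.sum_cons] at ih ⊢
      rw [ih, e1, e2, List.map_cons, List.sum_cons]; ring
    · have e1 : List.filter (fun p => decide (p.1 < h)) (p :: t) = List.filter (fun p => decide (p.1 < h)) t := by
        simp [List.filter_cons]; omega
      have e2 : List.filter (fun p => decide (p.1 > h)) (p :: t) = List.filter (fun p => decide (p.1 > h)) t := by
        simp [List.filter_cons]; omega
      simp only [pvDn, List.map_cons, List.sum_cons] at ih ⊢
      rw [ih, e1, e2, h1]; ring
    · have e1 : List.filter (fun p => decide (p.1 < h)) (p :: t) = List.filter (fun p => decide (p.1 < h)) t := by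
        simp [List.filter_cons]; omega
      have e2 : List.filter (fun p => decide (p.1 > h)) (p :: t) = p :: List.filter (fun p => decide (p.1 > h)) t := by
        simp [List.filter_cons]; omega
      simp only [pvDn, List.map_cons, List.sum_cons] at ih ⊢
      rw [ih, e1, e2, List.map_cons, List.sum_cons]; ring

-- B's running option-min is the plain running min after the first candidate
theorem pvOptFold (c : Int → Int) : ∀ (t : List Int) (x : Int),
    t.foldl (fun (best : Option Int) h =>
        match best with
        | none => some (c h)
        | some b => some (if c h < b then c h else b)) (some x)
    = some (t.foldl (fun m h => if c h < m then c h else m) x) := by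
  intro t
  induction t with
  | nil => intro x; rfl
  | cons y t ih => intro x; simp only [List.foldl_cons]; exact ih _

theorem pvFoldlMin_head : ∀ (l : List Int) (a : Int), (∀ x ∈ l, a ≤ x) → l.foldl min a = a := by
  intro l
  induction l with
  | nil => intro a _; rfl
  | cons x t ih =>
    intro a hle
    simp only [List.foldl_cons]
    rw [min_eq_left (hle x (List.mem_cons_self))]
    exact ih a (fun y hy => hle y (List.mem_cons_of_mem _ hy))

theorem pvMinHead_perm {x y : Int} {t s : List Int} (hp : (x :: t).Perm (y :: s)) :
    t.foldl min x = s.foldl min y := by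
  have hm1 : List.min? (x :: t) = some (t.foldl min x) := List.min?_cons'
  have hm2 : List.min? (y :: s) = some (s.foldl min y) := List.min?_cons'
  rw [List.min?_eq_some_iff] at hm1 hm2
  have hle1 := hm2.2 _ ((hp.mem_iff).mp hm1.1)
  have hle2 := hm1.2 _ ((hp.mem_iff).mpr hm2.1)
  omega

theorem pvEquiv (land : List (List Int)) (P Q : Int) (hpre : land.flatten ≠ []) :
    solution land P Q = solution_alt land P Q := by
  have hcellsA : land.foldl (fun acc l => acc ++ l) [] = land.flatten := by
    simpa using PySem.List.foldl_append_eq_flatten land []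
  have hcellsB : land.flatMap (fun row => row) = land.flatten := by
    simp
  unfold solution solution_alt
  rw [hcellsA, hcellsB]
  have hkeys : (PySem.Dict.counter land.flatten).keys = PySem.Set.ofList land.flatten :=
    PySem.Dict.keys_counter land.flatten
  have hsne : PySem.List.sorted (PySem.Dict.counter land.flatten).keys (fun x => x) false ≠ [] := by
    rw [Ne, PySem.List.sorted_eq_nil_iff, hkeys]
    intro h0
    obtain ⟨x, hx⟩ := List.exists_mem_of_ne_nil _ hpre
    have hx2 : x ∈ PySem.Set.ofList land.flatten := (PySem.Set.mem_ofList _ _).mpr hx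
    rw [h0] at hx2
    exact (List.not_mem_nil) hx2
  obtain ⟨L0, restK, hL⟩ := List.exists_cons_of_ne_nil hsne
  simp only []
  rw [hL]
  simp only []
  set d := PySem.Dict.counter land.flatten with hd
  have hnodup : d.keys.Nodup := PySem.Dict.nodup_keys_counter land.flatten
  have hchainK : (L0 :: restK).Pairwise (· < ·) := by
    rw [← hL, hd, hkeys]
    exact PySem.List.sorted_ofList_pairwise_lt land.flatten
  set g0 : Int → Int × Int := (fun k => (k, d.getD k 0)) with hg0
  set ps := (L0 :: restK).map g0 with hps
  set tl := restK.map g0 with htl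
  set c0 := d.getD L0 0 with hc0
  have hchain : ps.Pairwise (fun a b => a.1 < b.1) := by
    rw [hps]
    exact (List.pairwise_map).mpr (by simpa [hg0] using hchainK)
  have hf : ∀ p ∈ ps, d.getD p.1 0 = p.2 := by
    intro p hp
    rw [hps] at hp
    obtain ⟨k, _, rfl⟩ := List.mem_map.mp hp
    rfl
  have hpermK : (L0 :: restK).Perm d.keys := by
    rw [← hL, hd]
    exact PySem.List.sorted_perm d.keys (fun x => x) false
  have hitems : d.items = d.keys.map g0 := PySem.Dict.items_eq_map_keys d hnodup 0
  have hperm : ps.Perm d.items := by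
    rw [hitems, hps]
    exact hpermK.map g0
  set NN : Int := (land.length : Int) * (land.length : Int) with hNN
  set Tv := pvSumC ps with hTv
  obtain ⟨k0, kt, hK⟩ := List.exists_cons_of_ne_nil
    (fun h0 => by rw [h0] at hpermK; exact (List.cons_ne_nil L0 restK) hpermK.eq_nil)
    (l := d.keys)
  -- B's base is the minimum height, the head of A's sorted layer list
  have hbase : (PySem.List.min? d.keys (fun x => x)).getD 0 = L0 := by
    rw [hK, PySem.List.min?_id_cons, Option.getD_some]
    have h1 : kt.foldl min k0 = restK.foldl min L0 :=
      pvMinHead_perm (by rw [← hK]; exact hpermK.symm)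
    rw [h1]
    exact pvFoldlMin_head restK L0
      (fun x hx => le_of_lt ((List.pairwise_cons.mp hchainK).1 x hx))
  rw [hbase]
  have hB1 : List.foldl (fun s c => s + d.getD c 0 * (c - L0)) 0 d.keys = pvDn L0 tl := by
    rw [PySem.List.foldl_add (g := fun c => d.getD c 0 * (c - L0))]
    rw [← ((hpermK.map (fun c => d.getD c 0 * (c - L0))).sum_eq)]
    simp only [List.map_cons, List.sum_cons, pvDn, htl, List.map_map]
    simp [Function.comp_def, hg0]
  rw [hB1]
  have hDnP : pvDn L0 d.items = pvDn L0 ps := ((hperm.map _).sum_eq).symm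
  have hLt : ∀ h : Int, ((d.items.filter (fun p => decide (p.1 < h))).map (fun p => p.2 * (h - p.1))).sum
      = ((ps.filter (fun p => decide (p.1 < h))).map (fun p => p.2 * (h - p.1))).sum :=
    fun h => (((hperm.filter _).map _).sum_eq).symm
  -- B's candidate cost equals pvCostB, by volume conservation
  have hCB : ∀ h : Int,
      (((ps.filter (fun p => decide (p.1 < h))).map (fun p => p.2 * (h - p.1))).sum) * P +
        (pvDn L0 ps + (((ps.filter (fun p => decide (p.1 < h))).map (fun p => p.2 * (h - p.1))).sum)
          - NN * (h - L0)) * Q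
      = pvCostB P Q NN Tv L0 ps h := by
    intro h
    have hdn : pvDn h ps = pvDn L0 ps - Tv * (h - L0) := by
      rw [pvDn_shift ps L0 h, hTv]
    have hsp := pvSplitDn h ps
    unfold pvCostB
    rw [hsp] at hdn
    linear_combination (-Q) * hdn
  simp only [pvAddFold, pvDnFold, zero_add, hDnP, hLt, hCB]
  -- A's sweep computes the running min of pvCostB over the sorted layers
  have hsplit0 : ps = [] ++ (L0, c0) :: tl := by rw [hps, htl, List.map_cons]; rfl
  have main := pvLoop (fun k => d.getD k 0) P Q NN Tv L0 ps hchain hf hTv tl [] (L0, c0)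
      (0 * P + pvDn L0 tl * Q) hsplit0
  simp only [pvSumC, pvUp, List.map_nil, List.sum_nil, sub_zero, sub_self, mul_zero] at main
  have hmap1 : tl.map (fun x => x.1) = restK := by
    rw [htl, List.map_map]
    simp [Function.comp_def, hg0]
  rw [hmap1] at main
  rw [main]
  have hch2 : (([] : List (Int × Int)) ++ (L0, c0) :: tl).Pairwise (fun a b => a.1 < b.1) := by
    rw [← hsplit0]; exact hchain
  have hx0 : pvCostB P Q NN Tv L0 ps L0 = 0 * P + pvDn L0 tl * Q := by
    have hcs := pvCostB_split P Q NN Tv L0 [] tl (L0, c0) hch2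
    rw [← hsplit0] at hcs
    simp only [pvUp, List.map_nil, List.sum_nil, sub_self, mul_zero, sub_zero] at hcs
    rw [hcs]
  rw [← hx0]
  -- both running mins are min-folds over the same multiset of candidate costs
  have hminfold : ∀ (l : List Int) (x : Int),
      l.foldl (fun m h => if pvCostB P Q NN Tv L0 ps h < m then pvCostB P Q NN Tv L0 ps h else m) x
      = (l.map (pvCostB P Q NN Tv L0 ps)).foldl min x := by
    intro l x
    rw [List.foldl_map]
    congr 1
    funext m h
    rw [pvMin_eq]
  have hA : tl.foldl (fun m p =>
        if pvCostB P Q NN Tv L0 ps p.1 < m then pvCostB P Q NN Tv L0 ps p.1 else m)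
        (pvCostB P Q NN Tv L0 ps L0)
      = (restK.map (pvCostB P Q NN Tv L0 ps)).foldl min (pvCostB P Q NN Tv L0 ps L0) := by
    rw [htl, List.foldl_map]
    exact hminfold restK _
  rw [hA, hK, List.foldl_cons]
  simp only []
  rw [pvOptFold (pvCostB P Q NN Tv L0 ps) kt (pvCostB P Q NN Tv L0 ps k0), Option.getD_some,
      hminfold kt (pvCostB P Q NN Tv L0 ps k0)]
  exact pvMinHead_perm (by
    rw [← List.map_cons, ← List.map_cons, ← hK]
    exact hpermK.map (pvCostB P Q NN Tv L0 ps))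

-- ===== VERDICT (by name: the statement is the Claim_ definition above) =====
theorem solution_spec : Claim_equal_solution := by
  unfold Claim_equal_solution Spec_solution Pre_solution
  intro land P Q _ hpre
  exact pvEquiv land P Q hpre
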